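-- pv_equiv track=rewrite | github.com/Uninett/nav | tools/release/announcement.py | normalize_list_items
-- ===== SOURCE A (Python) =====
-- def normalize_list_items(text: str) -> str:
--     """Join continuation lines in markdown list items.
--
--     GitHub-flavored markdown preserves newlines, so multi-line list items
--     need to be collapsed to single lines for proper display.
--     """
--     lines = text.split("\n")
--     result: list[str] = []
--     current_item: list[str] = []
--
--     for line in lines:
--         if line.startswith("- "):
--             # Start of new list item - flush previous
--             if current_item:
--                 result.append("- " + " ".join(current_item))
--             current_item = [line[2:]]  # Remove "- " prefix
--         elif current_item and line.startswith("  "):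
--             # Continuation of list item (indented)
--             current_item.append(line.strip())
--         else:
--             # Not a list item
--             if current_item:
--                 result.append("- " + " ".join(current_item))
--                 current_item = []
--             result.append(line)
--
--     # Flush any remaining item
--     if current_item:
--         result.append("- " + " ".join(current_item))
--
--     return "\n".join(result)
-- ===== SOURCE B (Python) =====
-- def normalize_list_items(text: str) -> str:
--     """Join continuation lines in markdown list items.
--
--     Single pass writing directly into the result list: continuation
--     lines are appended to the last emitted item in place, so no
--     separate current-item buffer or flush sites are needed.
--     """
--     result: list[str] = []
--     in_item = False
--     for line in text.split("\n"):
--         if line.startswith("- "):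
--             result.append("- " + line[2:])
--             in_item = True
--         elif in_item and line.startswith("  "):
--             result[-1] += " " + line.strip()
--         else:
--             result.append(line)
--             in_item = False
--     return "\n".join(result)
-- ===== Notes on version B (the rewrite author's own statement) =====
-- stated objective: simpler
-- what changed: Replaces A's separate current_item buffer and its three flush sites with a single pass that emits each item line into the result immediately and extends result[-1] in place on continuation lines, tracked by one boolean flag.
import Mathlib
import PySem

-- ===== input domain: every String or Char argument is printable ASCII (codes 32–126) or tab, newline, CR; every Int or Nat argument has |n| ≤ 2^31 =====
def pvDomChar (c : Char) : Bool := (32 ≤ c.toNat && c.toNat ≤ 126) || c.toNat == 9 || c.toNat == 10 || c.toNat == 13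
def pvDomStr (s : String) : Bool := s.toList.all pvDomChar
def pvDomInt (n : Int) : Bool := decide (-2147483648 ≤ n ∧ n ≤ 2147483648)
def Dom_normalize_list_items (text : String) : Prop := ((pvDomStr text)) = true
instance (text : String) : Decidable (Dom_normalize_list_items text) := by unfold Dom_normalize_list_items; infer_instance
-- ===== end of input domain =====

-- B collapses the separate current-item buffer into the result list itself (a boolean flag plus
-- in-place extension of the last emitted line): simpler, no flush sites; same O(n) cost.

-- ===== PORT A =====
-- flush: 'if current_item: result.append("- " + " ".join(current_item))'
def pvFlushA (result : List (List Char)) (current : List (List Char)) : List (List Char) :=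
  if current ≠ [] then result ++ [['-', ' '] ++ PySem.Chars.join [' '] current] else result

def pvStepA (st : List (List Char) × List (List Char)) (line : List Char) :
    List (List Char) × List (List Char) :=
  if PySem.Chars.startswith line ['-', ' '] then
    (pvFlushA st.1 st.2, [PySem.Chars.slice line (some 2) none])
  else if st.2 ≠ [] ∧ PySem.Chars.startswith line [' ', ' '] then
    (st.1, st.2 ++ [PySem.Chars.strip line])
  else
    (pvFlushA st.1 st.2 ++ [line], [])

def normalize_list_items (text : String) : String :=
  let lines := PySem.Chars.splitOn text.toList ['\n']
  let st := lines.foldl pvStepA ([], [])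
  String.mk (PySem.Chars.join ['\n'] (pvFlushA st.1 st.2))

-- ===== PORT B =====
-- 'result[-1] += s' (only reached with result nonempty)
def pvAddToLast : List (List Char) → List Char → List (List Char)
  | [], s => [s]
  | [x], s => [x ++ s]
  | x :: y :: xs, s => x :: pvAddToLast (y :: xs) s

def pvStepB (st : List (List Char) × Bool) (line : List Char) : List (List Char) × Bool :=
  if PySem.Chars.startswith line ['-', ' '] then
    (st.1 ++ [['-', ' '] ++ PySem.Chars.slice line (some 2) none], true)
  else if st.2 ∧ PySem.Chars.startswith line [' ', ' '] then
    (pvAddToLast st.1 ([' '] ++ PySem.Chars.strip line), st.2)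
  else
    (st.1 ++ [line], false)

def normalize_list_items_alt (text : String) : String :=
  let st := (PySem.Chars.splitOn text.toList ['\n']).foldl pvStepB ([], false)
  String.mk (PySem.Chars.join ['\n'] st.1)

-- ===== PRECONDITION & SPEC =====
def Spec_normalize_list_items (text : String) (out : String) : Prop := out = normalize_list_items_alt text
instance (text : String) (out : String) : Decidable (Spec_normalize_list_items text out) := by unfold Spec_normalize_list_items; infer_instance

-- ===== CLAIM (what is proved, stated in full; the proofs are below) =====
def Claim_equal_normalize_list_items : Prop := ∀ (text : String), Dom_normalize_list_items text → Spec_normalize_list_items text (normalize_list_items text)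

-- ===== LEMMAS AND PROOFS =====

-- the invariant tying A's (result, current_item) to B's (result, in_item)
def pvRel (a : List (List Char) × List (List Char)) (b : List (List Char) × Bool) : Prop :=
  b.1 = pvFlushA a.1 a.2 ∧ (b.2 = true ↔ a.2 ≠ [])

theorem pvJoin_append_singleton (sep : List Char) (l : List (List Char)) (c : List Char)
    (h : l ≠ []) : PySem.Chars.join sep (l ++ [c]) = PySem.Chars.join sep l ++ sep ++ c := by
  induction l with
  | nil => exact absurd rfl h
  | cons x xs ih =>
    cases xs with
    | nil => simp [PySem.Chars.join_cons_cons, PySem.Chars.join_singleton]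
    | cons y ys =>
      have := ih (by simp)
      simp only [List.cons_append, PySem.Chars.join_cons_cons] at *
      simp [this]

theorem pvAddToLast_append (r : List (List Char)) (x s : List Char) :
    pvAddToLast (r ++ [x]) s = r ++ [x ++ s] := by
  induction r with
  | nil => simp [pvAddToLast]
  | cons a as ih =>
    cases as with
    | nil => simp [pvAddToLast]
    | cons b bs => simpa [pvAddToLast] using ih

theorem pvFlushA_pos (r : List (List Char)) (c : List (List Char)) (h : c ≠ []) :
    pvFlushA r c = r ++ [['-', ' '] ++ PySem.Chars.join [' '] c] := by
  simp [pvFlushA, h]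

theorem pvStep_rel (a : List (List Char) × List (List Char)) (b : List (List Char) × Bool)
    (line : List Char) (h : pvRel a b) : pvRel (pvStepA a line) (pvStepB b line) := by
  obtain ⟨h1, h2⟩ := h
  unfold pvStepA pvStepB
  by_cases hs : PySem.Chars.startswith line ['-', ' '] = true
  · simp only [hs, if_true]
    refine ⟨?_, by simp [pvFlushA]⟩
    simp [pvFlushA, PySem.Chars.join_singleton, h1]
  · simp only [hs, if_false]
    by_cases hc : a.2 = []
    · have hb2 : b.2 = false := by
        cases hb : b.2
        · rfl
        · exact absurd hc (h2.mp hb)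
      simp only [hc, hb2, ne_eq, not_true_eq_false, false_and, if_false, false_and]
      exact ⟨by simp [pvFlushA, h1, hc], by simp [hc]⟩
    · have hb2 : b.2 = true := h2.mpr hc
      by_cases hw : PySem.Chars.startswith line [' ', ' '] = true
      · simp only [hc, hb2, hw, ne_eq, not_false_eq_true, true_and, if_true, and_self]
        refine ⟨?_, by simpa using hc⟩
        have hne : a.2 ++ [PySem.Chars.strip line] ≠ [] := by simp
        simp only [Bool.false_eq_true, if_false]
        rw [h1, pvFlushA_pos _ _ hc, pvFlushA_pos _ _ hne, pvAddToLast_append,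
          pvJoin_append_singleton _ _ _ hc]
        simp
      · simp only [hc, hb2, hw, ne_eq, not_false_eq_true, true_and, if_false, and_false]
        exact ⟨by simp [h1, pvFlushA], by simp⟩

theorem pvFold_rel (lines : List (List Char)) (a : List (List Char) × List (List Char))
    (b : List (List Char) × Bool) (h : pvRel a b) :
    pvRel (lines.foldl pvStepA a) (lines.foldl pvStepB b) := by
  induction lines generalizing a b with
  | nil => exact h
  | cons l ls ih => exact ih _ _ (pvStep_rel a b l h)

-- ===== VERDICT (by name: the statement is the Claim_ definition above) =====
theorem normalize_list_items_spec : Claim_equal_normalize_list_items := by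
  intro text _
  have h := pvFold_rel (PySem.Chars.splitOn text.toList ['\n']) ([], []) ([], false)
    ⟨by simp [pvFlushA], by simp⟩
  show String.mk (PySem.Chars.join ['\n']
      (pvFlushA ((PySem.Chars.splitOn text.toList ['\n']).foldl pvStepA ([], [])).1
        ((PySem.Chars.splitOn text.toList ['\n']).foldl pvStepA ([], [])).2)) =
    String.mk (PySem.Chars.join ['\n']
      ((PySem.Chars.splitOn text.toList ['\n']).foldl pvStepB ([], false)).1)
  rw [h.1]
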